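-- pv_equiv track=rewrite | github.com/monstercleaning/gsc | scripts/phase2_e2_reproduce.py | _is_flag_present
-- ===== SOURCE A (Python) =====
-- from typing import Any, Dict, Iterable, List, Mapping, Optional, Sequence, Tuple
--
-- def _is_flag_present(tokens: Sequence[str], names: Sequence[str]) -> bool:
--     name_set = set(str(name) for name in names)
--     for token in tokens:
--         raw = str(token)
--         if raw in name_set:
--             return True
--         if "=" in raw:
--             key = raw.split("=", 1)[0]
--             if key in name_set:
--                 return True
--     return False
-- ===== SOURCE B (Python) =====
-- def _is_flag_present(tokens, names):
--     # Inverted search: for each name, scan the tokens with direct prefix matching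
--     # ("name=" at the start of a token) instead of splitting tokens and hashing.
--     for name in names:
--         target = str(name)
--         prefix = None if "=" in target else target + "="
--         for token in tokens:
--             raw = str(token)
--             if raw == target or (prefix is not None and raw.startswith(prefix)):
--                 return True
--     return False
-- ===== Notes on version B (the rewrite author's own statement) =====
-- stated objective: alternative
-- what changed: B inverts the search: it iterates over names in the outer loop and matches each token against the name by equality or by the token starting with 'name=' (no set, no splitting), whereas A builds a hash set of names and splits each token at '=' to probe it; correctness rests on: token.split('=',1)[0] == name iff '=' not in name and token.startswith(name+'=').
import Mathlib
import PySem

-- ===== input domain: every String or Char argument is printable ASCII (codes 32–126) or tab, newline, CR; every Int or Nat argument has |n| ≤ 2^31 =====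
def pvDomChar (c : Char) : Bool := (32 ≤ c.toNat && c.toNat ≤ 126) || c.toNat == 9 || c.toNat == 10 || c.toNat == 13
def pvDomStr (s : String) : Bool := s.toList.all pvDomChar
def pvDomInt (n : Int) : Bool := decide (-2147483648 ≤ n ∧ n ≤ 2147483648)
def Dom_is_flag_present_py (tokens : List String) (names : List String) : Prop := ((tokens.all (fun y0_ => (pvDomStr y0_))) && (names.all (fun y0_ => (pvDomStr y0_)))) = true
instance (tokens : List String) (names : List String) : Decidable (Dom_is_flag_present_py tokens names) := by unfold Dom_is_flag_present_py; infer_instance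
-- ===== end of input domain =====

-- B inverts the search: outer loop over names, matching each token by equality or by the
-- token starting with "name=" (no set, no splitting) — a different algorithm from A's
-- split-each-token-and-probe-a-hash-set (objective: alternative; same observable results).

-- ===== PORT A =====
-- raw.split("=", 1)[0]  (split with non-empty sep is always a non-empty some, so the
-- getD/headD defaults never fire)
def pvKeyOf (raw : String) : String :=
  ((PySem.Str.splitMax? raw "=" 1).getD []).headD ""

-- the for-loop with early return
def pvFlagLoopA (name_set : PySem.Set String) : List String → Bool
  | [] => false
  | raw :: rest =>
    if PySem.Set.contains name_set raw then true
    else if PySem.Str.isIn "=" raw then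
      if PySem.Set.contains name_set (pvKeyOf raw) then true
      else pvFlagLoopA name_set rest
    else pvFlagLoopA name_set rest

def is_flag_present_py (tokens : List String) (names : List String) : Bool :=
  -- str(name) on a str is the identity, so the comprehension is set(names)
  pvFlagLoopA (PySem.Set.ofList names) tokens

-- ===== PORT B =====
-- inner loop: scan the tokens for one name (target) with its optional "target=" prefix
def pvScanTokens (target : String) (prefix? : Option String) : List String → Bool
  | [] => false
  | raw :: rest =>
    if raw == target || (match prefix? with
                         | some p => PySem.Str.startswith raw p
                         | none => false) then true
    else pvScanTokens target prefix? rest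

-- outer loop over the names
def pvScanNames (tokens : List String) : List String → Bool
  | [] => false
  | name :: rest =>
    -- prefix = None if "=" in target else target + "="
    let prefix? := if PySem.Str.isIn "=" name then none else some (name ++ "=")
    if pvScanTokens name prefix? tokens then true else pvScanNames tokens rest

def is_flag_present_py_alt (tokens : List String) (names : List String) : Bool :=
  pvScanNames tokens names

-- ===== PRECONDITION & SPEC =====
def Spec_is_flag_present_py (tokens : List String) (names : List String) (out : Bool) : Prop := out = is_flag_present_py_alt tokens names
instance (tokens : List String) (names : List String) (out : Bool) : Decidable (Spec_is_flag_present_py tokens names out) := by unfold Spec_is_flag_present_py; infer_instance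

-- ===== CLAIM (what is proved, stated in full; the proofs are below) =====
def Claim_equal_is_flag_present_py : Prop := ∀ (tokens : List String) (names : List String), Dom_is_flag_present_py tokens names → Spec_is_flag_present_py tokens names (is_flag_present_py tokens names)

-- ===== LEMMAS AND PROOFS =====

-- splitOnMax.go with 0 splits left returns the rest as the last piece
theorem pvGoZero (f : Nat) (l : List Char) (acc : List (List Char)) :
    PySem.Chars.splitOnMax.go ['='] f 0 l [] acc = (l :: acc).reverse := by
  cases f with
  | zero => simp [PySem.Chars.splitOnMax.go]
  | succ f => cases l <;> simp [PySem.Chars.splitOnMax.go]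

-- splitOnMax.go with 1 split left, on input containing '=': first piece is the part
-- before the first '=', second piece the rest
theorem pvGoOne (l : List Char) (fuel : Nat) (cur : List Char) (acc : List (List Char))
    (hf : l.length < fuel) (hm : '=' ∈ l) :
    PySem.Chars.splitOnMax.go ['='] fuel 1 l cur acc =
      acc.reverse ++ [cur.reverse ++ l.takeWhile (· ≠ '='), (l.dropWhile (· ≠ '=')).tail] := by
  induction l generalizing fuel cur acc with
  | nil => simp at hm
  | cons c rest ih =>
    cases fuel with
    | zero => omega
    | succ f =>
      by_cases hc : c = '='
      · subst hc
        simp [PySem.Chars.splitOnMax.go, List.isPrefixOf, pvGoZero]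
      · have h1 : List.isPrefixOf ['='] (c :: rest) = false := by
          simp [List.isPrefixOf]; exact fun h => hc h.symm
        have hm' : '=' ∈ rest := by cases hm with
          | head => exact absurd rfl hc
          | tail _ h => exact h
        rw [PySem.Chars.splitOnMax.go, h1]
        simp only [Bool.false_eq_true, if_false, if_neg (by omega : ¬(1:Nat) = 0)]
        rw [ih f (c :: cur) acc (by simpa using hf) hm']
        simp [hc]

-- for a token containing '=', the split key is the maximal '='-free prefix
theorem pvKeyOf_toList (raw : String) (h : PySem.Str.isIn "=" raw = true) :
    (pvKeyOf raw).toList = raw.toList.takeWhile (· ≠ '=') := by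
  unfold pvKeyOf PySem.Str.splitMax?
  rw [PySem.Chars.splitMax?]
  have he : ("=":String).toList = ['='] := rfl
  rw [he, if_neg (by simp)]
  simp only [Option.map_some, Option.getD_some]
  unfold PySem.Chars.splitOnMax
  rw [if_neg (by omega)]
  have hm : '=' ∈ raw.toList := by
    have := PySem.Str.isIn_iff_infix (sub := "=") (s := raw) |>.mp h
    obtain ⟨s, t, hst⟩ := this
    rw [← hst]; simp
  rw [show Int.toNat 1 = 1 from rfl,
     pvGoOne raw.toList (raw.toList.length + 1) [] [] (by omega) hm]
  simp

-- the maximal '='-free prefix equals n iff n is '='-free and "n=" starts the list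
theorem pvTakeWhile_eq_iff (l n : List Char) (hm : '=' ∈ l) :
    l.takeWhile (· ≠ '=') = n ↔ ('=' ∉ n ∧ (n ++ ['=']) <+: l) := by
  constructor
  · rintro rfl
    refine ⟨fun hx => by simpa using List.mem_takeWhile_imp hx, ?_⟩
    have hd : l.dropWhile (· ≠ '=') ≠ [] := by
      simp only [ne_eq, List.dropWhile_eq_nil_iff, not_forall]
      exact ⟨'=', hm, by simp⟩
    obtain ⟨c, cs, hcs⟩ := List.exists_cons_of_ne_nil hd
    have hc : c = '=' := by
      have := List.head_dropWhile_not (fun x => decide (x ≠ '=')) hd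
      simp only [hcs, List.head_cons] at this
      simpa using this
    refine ⟨cs, ?_⟩
    rw [List.append_assoc]
    simp only [List.singleton_append, ← hc, ← hcs]
    exact List.takeWhile_append_dropWhile
  · rintro ⟨hn, ⟨rest, hrest⟩⟩
    rw [List.append_assoc, List.singleton_append] at hrest
    subst hrest
    have h1 : List.takeWhile (· ≠ '=') n = n := by
      rw [List.takeWhile_eq_self_iff]
      intro x hx
      simp only [decide_eq_true_eq]
      exact fun h => hn (h ▸ hx)
    rw [List.takeWhile_append, if_pos (by rw [h1])]
    simp

theorem pvIsIn_eq_iff_mem (s : String) :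
    PySem.Str.isIn "=" s = true ↔ '=' ∈ s.toList := by
  rw [PySem.Str.isIn_iff_infix]
  exact List.singleton_infix_iff '=' s.toList

-- a token that starts with "n=" contains '='
theorem pvIsIn_of_startswith (t n : String)
    (h : PySem.Str.startswith t (n ++ "=") = true) : PySem.Str.isIn "=" t = true := by
  rw [pvIsIn_eq_iff_mem]
  rw [PySem.Str.startswith_eq, PySem.Chars.startswith_iff] at h
  obtain ⟨rest, hrest⟩ := h
  rw [← hrest, String.toList_append]
  simp [show ("=":String).toList = ['='] from rfl]

-- A's split-key test equals B's prefix test (for a token containing '=')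
theorem pvKey_eq_iff (t n : String) (ht : PySem.Str.isIn "=" t = true) :
    pvKeyOf t = n ↔
      (PySem.Str.isIn "=" n = false ∧ PySem.Str.startswith t (n ++ "=") = true) := by
  have hm : '=' ∈ t.toList := (pvIsIn_eq_iff_mem t).mp ht
  rw [← String.toList_inj, pvKeyOf_toList t ht, pvTakeWhile_eq_iff _ _ hm,
     PySem.Str.startswith_eq, PySem.Chars.startswith_iff, String.toList_append,
     show ("=":String).toList = ['='] from rfl]
  have : PySem.Str.isIn "=" n = false ↔ '=' ∉ n.toList := by
    rw [← Bool.not_eq_true, not_iff_not, pvIsIn_eq_iff_mem]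
  rw [this]

-- A's loop returns true iff some token hits directly or via its key
theorem pvFlagLoopA_eq_true_iff (ns : PySem.Set String) (toks : List String) :
    pvFlagLoopA ns toks = true ↔
      ∃ t ∈ toks, PySem.Set.contains ns t = true ∨
        (PySem.Str.isIn "=" t = true ∧ PySem.Set.contains ns (pvKeyOf t) = true) := by
  induction toks with
  | nil => simp [pvFlagLoopA]
  | cons raw rest ih =>
    simp only [pvFlagLoopA]
    split_ifs with h1 h2 h3 <;> simp_all

-- B's inner loop as a single any over the tokens
theorem pvScanTokens_eq_any (target : String) (prefix? : Option String) (toks : List String) :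
    pvScanTokens target prefix? toks =
      toks.any (fun raw => raw == target || (match prefix? with
        | some p => PySem.Str.startswith raw p
        | none => false)) := by
  induction toks with
  | nil => simp [pvScanTokens]
  | cons raw rest ih =>
    simp only [pvScanTokens, List.any_cons]
    split_ifs with h <;> simp_all

-- B's outer loop as a single any over the names
theorem pvScanNames_eq_any (toks names : List String) :
    pvScanNames toks names =
      names.any (fun name => pvScanTokens name
        (if PySem.Str.isIn "=" name then none else some (name ++ "=")) toks) := by
  induction names with
  | nil => simp [pvScanNames]
  | cons name rest ih =>
    simp only [pvScanNames, List.any_cons, ← ih]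
    split_ifs <;> simp_all

-- ===== VERDICT (by name: the statement is the Claim_ definition above) =====
theorem is_flag_present_py_spec : Claim_equal_is_flag_present_py := by
  intro tokens names _
  unfold Spec_is_flag_present_py is_flag_present_py is_flag_present_py_alt
  rw [Bool.eq_iff_iff, pvFlagLoopA_eq_true_iff, pvScanNames_eq_any]
  simp only [List.any_eq_true, pvScanTokens_eq_any, Bool.or_eq_true, beq_iff_eq,
    PySem.Set.contains_iff, PySem.Set.mem_ofList]
  constructor
  · rintro ⟨t, ht, hcase⟩
    rcases hcase with hmem | ⟨hin, hkey⟩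
    · exact ⟨t, hmem, t, ht, Or.inl rfl⟩
    · obtain ⟨hne, hsw⟩ := (pvKey_eq_iff t (pvKeyOf t) hin).mp rfl
      refine ⟨pvKeyOf t, hkey, t, ht, Or.inr ?_⟩
      rw [if_neg (by rw [hne]; simp)]
      simpa using hsw
  · rintro ⟨n, hn, t, ht, hcase⟩
    rcases hcase with rfl | hmatch
    · exact ⟨t, ht, Or.inl hn⟩
    · by_cases hni : PySem.Str.isIn "=" n = true
      · rw [if_pos hni] at hmatch; simp at hmatch
      · rw [if_neg hni] at hmatch
        simp only [Bool.not_eq_true] at hni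
        have hsw : PySem.Str.startswith t (n ++ "=") = true := by simpa using hmatch
        have hin : PySem.Str.isIn "=" t = true := pvIsIn_of_startswith t n hsw
        have hk : pvKeyOf t = n := (pvKey_eq_iff t n hin).mpr ⟨hni, hsw⟩
        exact ⟨t, ht, Or.inr ⟨hin, hk ▸ hn⟩⟩
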